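-- pv_equiv track=rewrite | github.com/BlueTriangleG/CloudEnvInsights-KubeFissionDataProcessor | frontend/methods_of_residents/travel_analysis.py | extract_travel_modes
-- ===== SOURCE A (Python) =====
-- travel_modes = {
--     'car': ['car', 'automobile', 'vehicle'],
--     'bus': ['bus', 'coach'],
--     'bike': ['bike', 'bicycle', 'cycling'],
--     'walk': ['walk', 'walking', 'foot'],
--     'train': ['train', 'railway', 'subway'],
--     'scooter': ['scooter', 'e-scooter']
-- }
--
-- def extract_travel_modes(tokens):
--     modes = []
--     for mode, keywords in travel_modes.items():
--         for token in tokens: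
--             if token.lower() in keywords:
--                 modes.append(mode)
--                 break
--     return modes
-- ===== SOURCE B (Python) =====
-- travel_modes = {
--     'car': ['car', 'automobile', 'vehicle'],
--     'bus': ['bus', 'coach'],
--     'bike': ['bike', 'bicycle', 'cycling'],
--     'walk': ['walk', 'walking', 'foot'],
--     'train': ['train', 'railway', 'subway'],
--     'scooter': ['scooter', 'e-scooter']
-- }
--
-- _index = {kw: mode for mode, kws in travel_modes.items() for kw in kws}
--
-- def extract_travel_modes(tokens):
--     matched = set()
--     for token in tokens:
--         mode = _index.get(token.lower())
--         if mode is not None: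
--             matched.add(mode)
--     return [mode for mode in travel_modes if mode in matched]
-- ===== Notes on version B (the rewrite author's own statement) =====
-- stated objective: faster
-- what changed: Replaces the per-mode rescan of all tokens (nested loops with break) by a keyword->mode dict built once, a single indexed pass over the tokens collecting matched modes into a set, and a final order-preserving filter over the mode list.
import Mathlib
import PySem

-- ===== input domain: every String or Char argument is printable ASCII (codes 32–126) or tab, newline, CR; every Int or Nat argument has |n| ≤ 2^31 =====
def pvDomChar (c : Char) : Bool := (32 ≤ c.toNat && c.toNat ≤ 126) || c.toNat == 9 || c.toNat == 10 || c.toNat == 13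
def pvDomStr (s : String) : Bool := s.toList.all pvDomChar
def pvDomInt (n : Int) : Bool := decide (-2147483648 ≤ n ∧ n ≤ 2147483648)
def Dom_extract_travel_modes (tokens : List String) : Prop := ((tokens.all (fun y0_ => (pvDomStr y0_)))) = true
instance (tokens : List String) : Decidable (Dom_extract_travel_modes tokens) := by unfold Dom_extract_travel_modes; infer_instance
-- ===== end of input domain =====

-- B replaces A's per-mode rescan of the tokens by a keyword->mode dict built once, a single
-- pass over the tokens collecting matched modes into a set, and a filter over the mode list.

-- ===== PORT A =====
-- the module constant travel_modes (dict -> association list in insertion order)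
def travelModesA : List (String × List String) :=
  [("car", ["car", "automobile", "vehicle"]),
   ("bus", ["bus", "coach"]),
   ("bike", ["bike", "bicycle", "cycling"]),
   ("walk", ["walk", "walking", "foot"]),
   ("train", ["train", "railway", "subway"]),
   ("scooter", ["scooter", "e-scooter"])]

-- inner 'for token in tokens: if token.lower() in keywords: modes.append(mode); break'
def innerLoopA (tokens : List String) (keywords : List String) (mode : String)
    (modes : List String) : List String :=
  match tokens with
  | [] => modes
  | t :: rest =>
      if keywords.contains (PySem.Str.lower t) then modes ++ [mode]
      else innerLoopA rest keywords mode modes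

def extract_travel_modes (tokens : List String) : List String :=
  travelModesA.foldl (fun modes p => innerLoopA tokens p.2 p.1 modes) []

-- ===== PORT B =====
def travelModesB : List (String × List String) :=
  [("car", ["car", "automobile", "vehicle"]),
   ("bus", ["bus", "coach"]),
   ("bike", ["bike", "bicycle", "cycling"]),
   ("walk", ["walk", "walking", "foot"]),
   ("train", ["train", "railway", "subway"]),
   ("scooter", ["scooter", "e-scooter"])]

-- _index = {kw: mode for mode, kws in travel_modes.items() for kw in kws}
def kwIndex : PySem.Dict String String :=
  travelModesB.foldl (fun d p => p.2.foldl (fun d kw => d.insert kw p.1) d) PySem.Dict.empty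

def extract_travel_modes_alt (tokens : List String) : List String :=
  let matched : PySem.Set String :=
    tokens.foldl (fun s t =>
      match kwIndex.get? (PySem.Str.lower t) with
      | some m => PySem.Set.add s m
      | none => s) PySem.Set.empty
  (travelModesB.map Prod.fst).filter (fun m => PySem.Set.contains matched m)

-- ===== PRECONDITION & SPEC =====
def Spec_extract_travel_modes (tokens : List String) (out : List String) : Prop := out = extract_travel_modes_alt tokens
instance (tokens : List String) (out : List String) : Decidable (Spec_extract_travel_modes tokens out) := by unfold Spec_extract_travel_modes; infer_instance

-- ===== CLAIM (what is proved, stated in full; the proofs are below) =====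
def Claim_equal_extract_travel_modes : Prop := ∀ (tokens : List String), Dom_extract_travel_modes tokens → Spec_extract_travel_modes tokens (extract_travel_modes tokens)

-- ===== LEMMAS AND PROOFS =====

-- the inner break-loop appends the mode iff some token's lowercase form is a keyword
lemma innerLoopA_eq (tokens keywords : List String) (mode : String) (modes : List String) :
    innerLoopA tokens keywords mode modes =
      if tokens.any (fun t => keywords.contains (PySem.Str.lower t)) then modes ++ [mode]
      else modes := by
  induction tokens with
  | nil => simp [innerLoopA]
  | cons t rest ih =>
      by_cases h : PySem.Str.lower t ∈ keywords <;> simp [innerLoopA, h, ih]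

-- membership in the matched set built by B's single pass
lemma mem_matched (tokens : List String) (s : PySem.Set String) (m : String) :
    m ∈ tokens.foldl (fun s t =>
        match kwIndex.get? (PySem.Str.lower t) with
        | some m => PySem.Set.add s m
        | none => s) s ↔
      m ∈ s ∨ ∃ t ∈ tokens, kwIndex.get? (PySem.Str.lower t) = some m := by
  induction tokens generalizing s with
  | nil => simp
  | cons t rest ih =>
      simp only [List.foldl_cons]
      cases h : kwIndex.get? (PySem.Str.lower t) with
      | none =>
          rw [ih]
          constructor
          · rintro (hs | ⟨u, hu, hg⟩)
            · exact Or.inl hs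
            · exact Or.inr ⟨u, List.mem_cons_of_mem _ hu, hg⟩
          · rintro (hs | ⟨u, hu, hg⟩)
            · exact Or.inl hs
            · rcases List.mem_cons.mp hu with rfl | hu
              · rw [h] at hg; cases hg
              · exact Or.inr ⟨u, hu, hg⟩
      | some v =>
          rw [ih]
          constructor
          · rintro (hs | ⟨u, hu, hg⟩)
            · rcases (PySem.Set.mem_add _ _ _).mp hs with hs | rfl
              · exact Or.inl hs
              · exact Or.inr ⟨t, List.mem_cons_self .., h⟩
            · exact Or.inr ⟨u, List.mem_cons_of_mem _ hu, hg⟩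
          · rintro (hs | ⟨u, hu, hg⟩)
            · exact Or.inl ((PySem.Set.mem_add _ _ _).mpr (Or.inl hs))
            · rcases List.mem_cons.mp hu with rfl | hu
              · rw [h] at hg; injection hg with hv
                exact Or.inl ((PySem.Set.mem_add _ _ _).mpr (Or.inr hv.symm))
              · exact Or.inr ⟨u, hu, hg⟩

-- the keyword index, evaluated to its items list
lemma kwIndex_items : kwIndex.items =
    [("car", "car"), ("automobile", "car"), ("vehicle", "car"),
     ("bus", "bus"), ("coach", "bus"),
     ("bike", "bike"), ("bicycle", "bike"), ("cycling", "bike"),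
     ("walk", "walk"), ("walking", "walk"), ("foot", "walk"),
     ("train", "train"), ("railway", "train"), ("subway", "train"),
     ("scooter", "scooter"), ("e-scooter", "scooter")] := by rfl

lemma nodup_keys_kwIndex : kwIndex.keys.Nodup := by decide

lemma kwIndex_some_car (s : String) :
    kwIndex.get? s = some "car" ↔ ["car", "automobile", "vehicle"].contains s = true := by
  rw [PySem.Dict.get?_eq_some_iff_mem_items kwIndex s "car" nodup_keys_kwIndex, kwIndex_items]
  simp only [List.mem_cons, List.not_mem_nil, or_false, Prod.mk.injEq, List.contains_eq_mem,
    decide_eq_true_eq]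
  constructor
  · rintro (⟨rfl, h⟩|⟨rfl, h⟩|⟨rfl, h⟩|⟨rfl, h⟩|⟨rfl, h⟩|⟨rfl, h⟩|⟨rfl, h⟩|⟨rfl, h⟩|⟨rfl, h⟩|⟨rfl, h⟩|⟨rfl, h⟩|⟨rfl, h⟩|⟨rfl, h⟩|⟨rfl, h⟩|⟨rfl, h⟩|⟨rfl, h⟩) <;> first | (exact absurd h (by decide)) | simp
  · rintro (rfl|rfl|rfl) <;> simp

lemma kwIndex_some_bus (s : String) :
    kwIndex.get? s = some "bus" ↔ ["bus", "coach"].contains s = true := by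
  rw [PySem.Dict.get?_eq_some_iff_mem_items kwIndex s "bus" nodup_keys_kwIndex, kwIndex_items]
  simp only [List.mem_cons, List.not_mem_nil, or_false, Prod.mk.injEq, List.contains_eq_mem,
    decide_eq_true_eq]
  constructor
  · rintro (⟨rfl, h⟩|⟨rfl, h⟩|⟨rfl, h⟩|⟨rfl, h⟩|⟨rfl, h⟩|⟨rfl, h⟩|⟨rfl, h⟩|⟨rfl, h⟩|⟨rfl, h⟩|⟨rfl, h⟩|⟨rfl, h⟩|⟨rfl, h⟩|⟨rfl, h⟩|⟨rfl, h⟩|⟨rfl, h⟩|⟨rfl, h⟩) <;> first | (exact absurd h (by decide)) | simp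
  · rintro (rfl|rfl) <;> simp

lemma kwIndex_some_bike (s : String) :
    kwIndex.get? s = some "bike" ↔ ["bike", "bicycle", "cycling"].contains s = true := by
  rw [PySem.Dict.get?_eq_some_iff_mem_items kwIndex s "bike" nodup_keys_kwIndex, kwIndex_items]
  simp only [List.mem_cons, List.not_mem_nil, or_false, Prod.mk.injEq, List.contains_eq_mem,
    decide_eq_true_eq]
  constructor
  · rintro (⟨rfl, h⟩|⟨rfl, h⟩|⟨rfl, h⟩|⟨rfl, h⟩|⟨rfl, h⟩|⟨rfl, h⟩|⟨rfl, h⟩|⟨rfl, h⟩|⟨rfl, h⟩|⟨rfl, h⟩|⟨rfl, h⟩|⟨rfl, h⟩|⟨rfl, h⟩|⟨rfl, h⟩|⟨rfl, h⟩|⟨rfl, h⟩) <;> first | (exact absurd h (by decide)) | simp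
  · rintro (rfl|rfl|rfl) <;> simp

lemma kwIndex_some_walk (s : String) :
    kwIndex.get? s = some "walk" ↔ ["walk", "walking", "foot"].contains s = true := by
  rw [PySem.Dict.get?_eq_some_iff_mem_items kwIndex s "walk" nodup_keys_kwIndex, kwIndex_items]
  simp only [List.mem_cons, List.not_mem_nil, or_false, Prod.mk.injEq, List.contains_eq_mem,
    decide_eq_true_eq]
  constructor
  · rintro (⟨rfl, h⟩|⟨rfl, h⟩|⟨rfl, h⟩|⟨rfl, h⟩|⟨rfl, h⟩|⟨rfl, h⟩|⟨rfl, h⟩|⟨rfl, h⟩|⟨rfl, h⟩|⟨rfl, h⟩|⟨rfl, h⟩|⟨rfl, h⟩|⟨rfl, h⟩|⟨rfl, h⟩|⟨rfl, h⟩|⟨rfl, h⟩) <;> first | (exact absurd h (by decide)) | simp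
  · rintro (rfl|rfl|rfl) <;> simp

lemma kwIndex_some_train (s : String) :
    kwIndex.get? s = some "train" ↔ ["train", "railway", "subway"].contains s = true := by
  rw [PySem.Dict.get?_eq_some_iff_mem_items kwIndex s "train" nodup_keys_kwIndex, kwIndex_items]
  simp only [List.mem_cons, List.not_mem_nil, or_false, Prod.mk.injEq, List.contains_eq_mem,
    decide_eq_true_eq]
  constructor
  · rintro (⟨rfl, h⟩|⟨rfl, h⟩|⟨rfl, h⟩|⟨rfl, h⟩|⟨rfl, h⟩|⟨rfl, h⟩|⟨rfl, h⟩|⟨rfl, h⟩|⟨rfl, h⟩|⟨rfl, h⟩|⟨rfl, h⟩|⟨rfl, h⟩|⟨rfl, h⟩|⟨rfl, h⟩|⟨rfl, h⟩|⟨rfl, h⟩) <;> first | (exact absurd h (by decide)) | simp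
  · rintro (rfl|rfl|rfl) <;> simp

lemma kwIndex_some_scooter (s : String) :
    kwIndex.get? s = some "scooter" ↔ ["scooter", "e-scooter"].contains s = true := by
  rw [PySem.Dict.get?_eq_some_iff_mem_items kwIndex s "scooter" nodup_keys_kwIndex, kwIndex_items]
  simp only [List.mem_cons, List.not_mem_nil, or_false, Prod.mk.injEq, List.contains_eq_mem,
    decide_eq_true_eq]
  constructor
  · rintro (⟨rfl, h⟩|⟨rfl, h⟩|⟨rfl, h⟩|⟨rfl, h⟩|⟨rfl, h⟩|⟨rfl, h⟩|⟨rfl, h⟩|⟨rfl, h⟩|⟨rfl, h⟩|⟨rfl, h⟩|⟨rfl, h⟩|⟨rfl, h⟩|⟨rfl, h⟩|⟨rfl, h⟩|⟨rfl, h⟩|⟨rfl, h⟩) <;> first | (exact absurd h (by decide)) | simp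
  · rintro (rfl|rfl) <;> simp
-- the matched set contains a mode iff some token's lowercase form is one of its keywords
lemma matched_contains (tokens : List String) (mode : String) (kws : List String)
    (hchar : ∀ s : String, kwIndex.get? s = some mode ↔ kws.contains s = true) :
    PySem.Set.contains (tokens.foldl (fun s t =>
        match kwIndex.get? (PySem.Str.lower t) with
        | some m => PySem.Set.add s m
        | none => s) PySem.Set.empty) mode
      = tokens.any (fun t => kws.contains (PySem.Str.lower t)) := by
  rw [Bool.eq_iff_iff, PySem.Set.contains_iff, mem_matched, List.any_eq_true]
  constructor
  · rintro (hs | ⟨t, ht, hg⟩)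
    · cases hs
    · exact ⟨t, ht, (hchar _).mp hg⟩
  · rintro ⟨t, ht, hc⟩
    exact Or.inr ⟨t, ht, (hchar _).mpr hc⟩

-- ===== VERDICT (by name: the statement is the Claim_ definition above) =====
theorem extract_travel_modes_spec : Claim_equal_extract_travel_modes := by
  intro tokens _
  unfold Spec_extract_travel_modes extract_travel_modes extract_travel_modes_alt
  simp only [travelModesA, travelModesB, List.foldl_cons, List.foldl_nil,
    List.map_cons, List.map_nil, List.filter_cons, List.filter_nil, innerLoopA_eq,
    matched_contains tokens "car" _ kwIndex_some_car,
    matched_contains tokens "bus" _ kwIndex_some_bus,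
    matched_contains tokens "bike" _ kwIndex_some_bike,
    matched_contains tokens "walk" _ kwIndex_some_walk,
    matched_contains tokens "train" _ kwIndex_some_train,
    matched_contains tokens "scooter" _ kwIndex_some_scooter]
  split_ifs <;> rfl
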